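-- pv_equiv track=rewrite | github.com/flyingnobita/sm-tracker | src/sm_tracker/cli/__init__.py | _validate_required_env_values
-- ===== SOURCE A (Python) =====
-- from collections.abc import Mapping, Sequence
--
-- def _validate_required_env_values(env_values: Mapping[str, str]) -> list[str]:
--     missing_by_platform: dict[str, list[str]] = {
--         "twitter": ["TWITTER_BEARER_TOKEN", "TWITTER_HANDLE"],
--         "bluesky": ["BLUESKY_HANDLE"],
--         "farcaster": ["FARCASTER_API_KEY", "FARCASTER_USERNAME"],
--         "mastodon": ["MASTODON_ACCESS_TOKEN", "MASTODON_INSTANCE"],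
--         "threads": ["THREADS_ACCESS_TOKEN", "THREADS_USER_ID"],
--         "youtube": ["YOUTUBE_API_KEY"],
--     }
--     warnings: list[str] = []
--     for platform, keys in missing_by_platform.items():
--         missing = [key for key in keys if not env_values.get(key, "").strip()]
--
--         if platform == "youtube":
--             if (
--                 not env_values.get("YOUTUBE_CHANNEL_ID", "").strip()
--                 and not env_values.get("YOUTUBE_HANDLE", "").strip()
--             ):
--                 missing.append("YOUTUBE_CHANNEL_ID or YOUTUBE_HANDLE")
--
--         if missing:
--             warnings.append(f"{platform}: missing {', '.join(missing)}")
--     return warnings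
-- ===== SOURCE B (Python) =====
-- def _validate_required_env_values(env_values):
--     """Grouping-scan variant: one flat table of requirement rows
--     (platform, label, alternative keys); rows of a platform are adjacent,
--     a row is unmet iff every alternative key is blank; a platform's warning
--     is flushed when the scan moves on to the next platform."""
--     rows = [
--         ("twitter", "TWITTER_BEARER_TOKEN", ["TWITTER_BEARER_TOKEN"]),
--         ("twitter", "TWITTER_HANDLE", ["TWITTER_HANDLE"]),
--         ("bluesky", "BLUESKY_HANDLE", ["BLUESKY_HANDLE"]),
--         ("farcaster", "FARCASTER_API_KEY", ["FARCASTER_API_KEY"]),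
--         ("farcaster", "FARCASTER_USERNAME", ["FARCASTER_USERNAME"]),
--         ("mastodon", "MASTODON_ACCESS_TOKEN", ["MASTODON_ACCESS_TOKEN"]),
--         ("mastodon", "MASTODON_INSTANCE", ["MASTODON_INSTANCE"]),
--         ("threads", "THREADS_ACCESS_TOKEN", ["THREADS_ACCESS_TOKEN"]),
--         ("threads", "THREADS_USER_ID", ["THREADS_USER_ID"]),
--         ("youtube", "YOUTUBE_API_KEY", ["YOUTUBE_API_KEY"]),
--         ("youtube", "YOUTUBE_CHANNEL_ID or YOUTUBE_HANDLE",
--          ["YOUTUBE_CHANNEL_ID", "YOUTUBE_HANDLE"]),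
--     ]
--     warnings = []
--     cur_platform = None
--     cur_missing = []
--     for platform, label, keys in rows:
--         if cur_platform != platform:
--             if cur_missing:
--                 warnings.append(f"{cur_platform}: missing {', '.join(cur_missing)}")
--             cur_platform = platform
--             cur_missing = []
--         if all(not env_values.get(k, "").strip() for k in keys):
--             cur_missing.append(label)
--     if cur_missing:
--         warnings.append(f"{cur_platform}: missing {', '.join(cur_missing)}")
--     return warnings
-- ===== Notes on version B (the rewrite author's own statement) =====
-- stated objective: alternative
-- what changed: Replaced the per-platform dict with its inner key loop and hard-coded youtube special-case branch by one flat table of requirement rows (platform, label, alternative keys) processed in a single grouping scan that accumulates a platform's missing labels and flushes its warning when the scanned platform changes.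
import Mathlib
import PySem

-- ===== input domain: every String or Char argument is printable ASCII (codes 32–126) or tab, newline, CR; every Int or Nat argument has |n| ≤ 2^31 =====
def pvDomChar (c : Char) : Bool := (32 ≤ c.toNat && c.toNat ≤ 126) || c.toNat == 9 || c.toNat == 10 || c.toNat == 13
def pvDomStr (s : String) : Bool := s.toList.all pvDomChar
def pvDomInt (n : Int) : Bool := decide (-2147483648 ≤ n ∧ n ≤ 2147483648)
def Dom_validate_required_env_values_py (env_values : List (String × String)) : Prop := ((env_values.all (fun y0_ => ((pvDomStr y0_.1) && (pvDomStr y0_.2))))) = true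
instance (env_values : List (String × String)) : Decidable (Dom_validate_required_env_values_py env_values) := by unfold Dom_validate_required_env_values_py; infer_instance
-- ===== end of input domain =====

-- B replaces A's per-platform key lists plus youtube special case by one flat
-- table of requirement rows scanned once with a flush-on-platform-change
-- accumulator (objective: alternative).

-- ===== PORT A =====
-- env_values.get(key, "").strip() is falsy  (dict ported as assoc list, first match)
def pyABlank (env : List (String × String)) (key : String) : Bool :=
  PySem.Str.strip ((match env.find? (fun p => p.1 == key) with
                    | some p => p.2
                    | none => "")) == ""

def validate_required_env_values_py (env_values : List (String × String)) : List String :=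
  let missing_by_platform : List (String × List String) :=
    [ ("twitter", ["TWITTER_BEARER_TOKEN", "TWITTER_HANDLE"]),
      ("bluesky", ["BLUESKY_HANDLE"]),
      ("farcaster", ["FARCASTER_API_KEY", "FARCASTER_USERNAME"]),
      ("mastodon", ["MASTODON_ACCESS_TOKEN", "MASTODON_INSTANCE"]),
      ("threads", ["THREADS_ACCESS_TOKEN", "THREADS_USER_ID"]),
      ("youtube", ["YOUTUBE_API_KEY"]) ]
  missing_by_platform.foldl
    (fun warnings pk =>
      let missing := pk.2.filter (fun key => pyABlank env_values key)
      let missing :=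
        if pk.1 == "youtube" then
          if pyABlank env_values "YOUTUBE_CHANNEL_ID" && pyABlank env_values "YOUTUBE_HANDLE" then
            missing ++ ["YOUTUBE_CHANNEL_ID or YOUTUBE_HANDLE"]
          else missing
        else missing
      if missing.isEmpty then warnings
      else warnings ++ [pk.1 ++ ": missing " ++ PySem.Str.join ", " missing])
    []

-- ===== PORT B =====
-- not env_values.get(k, "").strip()
def pyBBlank (env : List (String × String)) (key : String) : Bool :=
  PySem.Str.strip ((match env.find? (fun p => p.1 == key) with
                    | some p => p.2
                    | none => "")) == ""

-- f"{cur_platform}": Python prints None as "None" (unreachable when cur_missing ≠ [])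
def pvBShow (cur_platform : Option String) : String :=
  match cur_platform with
  | some p => p
  | none => "None"

-- the two identical 'if cur_missing: warnings.append(...)' flush sites of Source B
def pvBFlush (warnings : List String) (cur_platform : Option String) (cur_missing : List String) : List String :=
  if cur_missing.isEmpty then warnings
  else warnings ++ [pvBShow cur_platform ++ ": missing " ++ PySem.Str.join ", " cur_missing]

def pvBRows : List (String × String × List String) :=
  [ ("twitter", "TWITTER_BEARER_TOKEN", ["TWITTER_BEARER_TOKEN"]),
    ("twitter", "TWITTER_HANDLE", ["TWITTER_HANDLE"]),
    ("bluesky", "BLUESKY_HANDLE", ["BLUESKY_HANDLE"]),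
    ("farcaster", "FARCASTER_API_KEY", ["FARCASTER_API_KEY"]),
    ("farcaster", "FARCASTER_USERNAME", ["FARCASTER_USERNAME"]),
    ("mastodon", "MASTODON_ACCESS_TOKEN", ["MASTODON_ACCESS_TOKEN"]),
    ("mastodon", "MASTODON_INSTANCE", ["MASTODON_INSTANCE"]),
    ("threads", "THREADS_ACCESS_TOKEN", ["THREADS_ACCESS_TOKEN"]),
    ("threads", "THREADS_USER_ID", ["THREADS_USER_ID"]),
    ("youtube", "YOUTUBE_API_KEY", ["YOUTUBE_API_KEY"]),
    ("youtube", "YOUTUBE_CHANNEL_ID or YOUTUBE_HANDLE", ["YOUTUBE_CHANNEL_ID", "YOUTUBE_HANDLE"]) ]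

-- Source B's for-loop over the rows, state = (warnings, cur_platform, cur_missing)
def pvBLoop (env : List (String × String)) :
    List (String × String × List String) → List String → Option String → List String → List String
  | [], warnings, cur_p, cur_m => pvBFlush warnings cur_p cur_m
  | (platform, label, keys) :: rest, warnings, cur_p, cur_m =>
    let st : List String × Option String × List String :=
      if cur_p != some platform then (pvBFlush warnings cur_p cur_m, some platform, [])
      else (warnings, cur_p, cur_m)
    let cur_m' := if keys.all (fun k => pyBBlank env k) then st.2.2 ++ [label] else st.2.2
    pvBLoop env rest st.1 st.2.1 cur_m'

def validate_required_env_values_py_alt (env_values : List (String × String)) : List String :=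
  pvBLoop env_values pvBRows [] none []

-- ===== PRECONDITION & SPEC =====
def Spec_validate_required_env_values_py (env_values : List (String × String)) (out : List String) : Prop := out = validate_required_env_values_py_alt env_values
instance (env_values : List (String × String)) (out : List String) : Decidable (Spec_validate_required_env_values_py env_values out) := by unfold Spec_validate_required_env_values_py; infer_instance

-- ===== CLAIM (what is proved, stated in full; the proofs are below) =====
def Claim_equal_validate_required_env_values_py : Prop := ∀ (env_values : List (String × String)), Dom_validate_required_env_values_py env_values → Spec_validate_required_env_values_py env_values (validate_required_env_values_py env_values)

-- ===== LEMMAS AND PROOFS =====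

lemma blank_eq (env : List (String × String)) (k : String) :
    pyBBlank env k = pyABlank env k := rfl

-- a two-single-key-row platform block, entered with a different cur_platform
lemma blockPair (env : List (String × String)) (p l1 k1 l2 k2 : String)
    (rest : List (String × String × List String)) (w : List String)
    (cur_p : Option String) (cur_m : List String) (h : (cur_p != some p) = true) :
    pvBLoop env ((p, l1, [k1]) :: (p, l2, [k2]) :: rest) w cur_p cur_m
      = pvBLoop env rest (pvBFlush w cur_p cur_m) (some p)
          ((if pyABlank env k1 then [l1] else []) ++ (if pyABlank env k2 then [l2] else [])) := by
  cases h1 : pyABlank env k1 <;> cases h2 : pyABlank env k2 <;>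
    simp [pvBLoop, h, blank_eq, h1, h2]

-- a one-row platform block
lemma blockSingle (env : List (String × String)) (p l1 k1 : String)
    (rest : List (String × String × List String)) (w : List String)
    (cur_p : Option String) (cur_m : List String) (h : (cur_p != some p) = true) :
    pvBLoop env ((p, l1, [k1]) :: rest) w cur_p cur_m
      = pvBLoop env rest (pvBFlush w cur_p cur_m) (some p)
          (if pyABlank env k1 then [l1] else []) := by
  cases h1 : pyABlank env k1 <;> simp [pvBLoop, h, blank_eq, h1]

-- the youtube block: single-key row then the two-alternative row
lemma blockYT (env : List (String × String)) (w : List String)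
    (cur_p : Option String) (cur_m : List String) (h : (cur_p != some "youtube") = true) :
    pvBLoop env [("youtube", "YOUTUBE_API_KEY", ["YOUTUBE_API_KEY"]),
                 ("youtube", "YOUTUBE_CHANNEL_ID or YOUTUBE_HANDLE",
                  ["YOUTUBE_CHANNEL_ID", "YOUTUBE_HANDLE"])] w cur_p cur_m
      = pvBFlush (pvBFlush w cur_p cur_m) (some "youtube")
          ((if pyABlank env "YOUTUBE_API_KEY" then ["YOUTUBE_API_KEY"] else []) ++
           (if pyABlank env "YOUTUBE_CHANNEL_ID" && pyABlank env "YOUTUBE_HANDLE" then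
              ["YOUTUBE_CHANNEL_ID or YOUTUBE_HANDLE"] else [])) := by
  cases h1 : pyABlank env "YOUTUBE_API_KEY" <;>
    cases h2 : pyABlank env "YOUTUBE_CHANNEL_ID" <;>
    cases h3 : pyABlank env "YOUTUBE_HANDLE" <;>
    simp [pvBLoop, h, blank_eq, h1, h2, h3]

-- A's filter over a two-key list, as the appended ifs B accumulates
lemma filter_pair (f : String → Bool) (k1 k2 : String) :
    List.filter f [k1, k2] = (if f k1 then [k1] else []) ++ (if f k2 then [k2] else []) := by
  cases h1 : f k1 <;> cases h2 : f k2 <;> simp [List.filter, h1, h2]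

lemma filter_single (f : String → Bool) (k1 : String) :
    List.filter f [k1] = (if f k1 then [k1] else []) := by
  cases h1 : f k1 <;> simp [List.filter, h1]

-- A's youtube conditional append, in B's appended-ifs shape
lemma append_ite (P : Prop) [Decidable P] (xs ys : List String) :
    (if P then xs ++ ys else xs) = xs ++ (if P then ys else []) := by
  split_ifs <;> simp

-- ===== VERDICT (by name: the statement is the Claim_ definition above) =====
theorem validate_required_env_values_py_spec : Claim_equal_validate_required_env_values_py := by
  intro env _
  unfold Spec_validate_required_env_values_py
  unfold validate_required_env_values_py validate_required_env_values_py_alt pvBRows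
  rw [blockPair env "twitter" _ _ _ _ _ _ _ _ (by decide),
      blockSingle env "bluesky" _ _ _ _ _ _ (by decide),
      blockPair env "farcaster" _ _ _ _ _ _ _ _ (by decide),
      blockPair env "mastodon" _ _ _ _ _ _ _ _ (by decide),
      blockPair env "threads" _ _ _ _ _ _ _ _ (by decide),
      blockYT env _ _ _ (by decide)]
  have ne1 : (("twitter" : String) == "youtube") = false := by decide
  have ne2 : (("bluesky" : String) == "youtube") = false := by decide
  have ne3 : (("farcaster" : String) == "youtube") = false := by decide
  have ne4 : (("mastodon" : String) == "youtube") = false := by decide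
  have ne5 : (("threads" : String) == "youtube") = false := by decide
  have ey : (("youtube" : String) == "youtube") = true := by decide
  simp only [List.foldl_cons, List.foldl_nil, ne1, ne2, ne3, ne4, ne5, ey,
    Bool.false_eq_true, if_false, if_true]
  simp only [append_ite, filter_pair, filter_single]
  simp [pvBFlush, pvBShow]
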